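-- pv_equiv track=rewrite | github.com/Kajojan/Gra-Python | lab7/7.5.py | liczba
-- ===== SOURCE A (Python) =====
-- def liczba(lista,x):
--     n=0
--     równe=-0
--     mniejsze=0
--     wieksze=0
--     while n <len(lista):
--         if lista[n]==x:
--             równe+=1
--         if lista[n]>x:
--             wieksze+=1
--         if lista[n]<x:
--             mniejsze+=1
--         n+=1
--     return równe,wieksze, mniejsze
-- ===== SOURCE B (Python) =====
-- def liczba(lista, x):
--     # three independent counting passes instead of one fused index loop
--     rowne = sum(1 for e in lista if e == x)
--     wieksze = sum(1 for e in lista if e > x)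
--     mniejsze = sum(1 for e in lista if e < x)
--     return rowne, wieksze, mniejsze
-- ===== Notes on version B (the rewrite author's own statement) =====
-- stated objective: simpler
-- what changed: Replaced the single while-loop over an index maintaining three counters with three independent generator-sum passes, one per comparison.
import Mathlib
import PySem

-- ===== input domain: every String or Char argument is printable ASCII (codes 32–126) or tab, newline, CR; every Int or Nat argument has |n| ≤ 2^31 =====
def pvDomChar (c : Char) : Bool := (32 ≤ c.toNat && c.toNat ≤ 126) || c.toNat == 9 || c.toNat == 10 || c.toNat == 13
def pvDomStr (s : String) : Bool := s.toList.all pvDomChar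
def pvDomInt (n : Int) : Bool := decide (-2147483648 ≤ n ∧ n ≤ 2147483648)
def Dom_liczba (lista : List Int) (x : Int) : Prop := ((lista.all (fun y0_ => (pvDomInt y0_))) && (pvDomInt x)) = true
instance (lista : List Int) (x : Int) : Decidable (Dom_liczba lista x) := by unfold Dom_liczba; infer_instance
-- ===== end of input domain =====

-- B replaces A's single index-driven while-loop carrying three counters by three
-- independent counting passes (one per comparison); same values, different decomposition.

-- ===== PORT A =====
-- while n < len(lista): update the three counters, n += 1   (index always in range)
def liczbaGo (lista : List Int) (x : Int) (n : Nat) (r w m : Int) : Int × Int × Int :=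
  if h : n < lista.length then
    liczbaGo lista x (n + 1)
      (if lista[n] == x then r + 1 else r)
      (if lista[n] > x then w + 1 else w)
      (if lista[n] < x then m + 1 else m)
  else (r, w, m)
termination_by lista.length - n

def liczba (lista : List Int) (x : Int) : Int × Int × Int :=
  liczbaGo lista x 0 (-0) 0 0

-- ===== PORT B =====
-- sum(1 for e in lista if <cond>) as a fold, one pass per condition
def liczbaCount (lista : List Int) (p : Int → Bool) : Int :=
  lista.foldl (fun s e => if p e then s + 1 else s) 0

def liczba_alt (lista : List Int) (x : Int) : Int × Int × Int :=
  (liczbaCount lista (fun e => e == x),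
   liczbaCount lista (fun e => e > x),
   liczbaCount lista (fun e => e < x))

-- ===== PRECONDITION & SPEC =====
def Spec_liczba (lista : List Int) (x : Int) (out : Int × Int × Int) : Prop := out = liczba_alt lista x
instance (lista : List Int) (x : Int) (out : Int × Int × Int) : Decidable (Spec_liczba lista x out) := by unfold Spec_liczba; infer_instance

-- ===== CLAIM (what is proved, stated in full; the proofs are below) =====
def Claim_equal_liczba : Prop := ∀ (lista : List Int) (x : Int), Dom_liczba lista x → Spec_liczba lista x (liczba lista x)

-- ===== LEMMAS AND PROOFS =====
theorem liczbaCount_shift (lista : List Int) (p : Int → Bool) (s : Int) :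
    lista.foldl (fun s e => if p e then s + 1 else s) s = s + liczbaCount lista p := by
  induction lista generalizing s with
  | nil => simp [liczbaCount]
  | cons a t ih =>
    simp only [liczbaCount, List.foldl_cons]
    rw [ih, ih (if p a then 0 + 1 else 0)]
    split <;> ring

theorem liczbaCount_cons (a : Int) (t : List Int) (p : Int → Bool) :
    liczbaCount (a :: t) p = (if p a then 1 else 0) + liczbaCount t p := by
  conv_lhs => rw [liczbaCount]
  rw [List.foldl_cons, liczbaCount_shift]
  split <;> norm_num

theorem liczbaGo_drop (lista : List Int) (x : Int) (n : Nat) (r w m : Int) :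
    liczbaGo lista x n r w m =
      (r + liczbaCount (lista.drop n) (fun e => e == x),
       w + liczbaCount (lista.drop n) (fun e => e > x),
       m + liczbaCount (lista.drop n) (fun e => e < x)) := by
  rw [liczbaGo]
  split
  · next h =>
    rw [liczbaGo_drop]
    have hd : lista.drop n = lista[n] :: lista.drop (n + 1) :=
      (List.drop_eq_getElem_cons h)
    rw [hd, liczbaCount_cons, liczbaCount_cons, liczbaCount_cons]
    refine Prod.ext ?_ (Prod.ext ?_ ?_) <;> simp <;> split <;> ring
  · next h =>
    have : lista.drop n = [] := List.drop_eq_nil_of_le (by omega)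
    simp [this, liczbaCount]
termination_by lista.length - n

-- ===== VERDICT (by name: the statement is the Claim_ definition above) =====
theorem liczba_spec : Claim_equal_liczba := by
  intro lista x _
  unfold Spec_liczba liczba liczba_alt
  rw [liczbaGo_drop]
  simp
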